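-- pv_equiv track=rewrite | github.com/Dia-Rav/------- | task_3/epsilon.py | minus_min
-- ===== SOURCE A (Python) =====
-- def minus_min(matrix):
--         H_tmp = 0
--
--         for i in range(len(matrix)):
--             min_row = min(matrix[i])
--             H_tmp += min_row
--             for j in range(len(matrix)):
--                 matrix[i][j] -= min_row
--         for i in range (len(matrix)):
--             min_column = min(row[i] for row in matrix)
--             H_tmp += min_column
--             for j in range (len(matrix)):
--                 matrix[j][i] -= min_column
--         return (matrix, H_tmp)
-- ===== SOURCE B (Python) =====
-- def minus_min(matrix):
--     # Precompute all row minima and all column minima (of the row-reduced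
--     # matrix), then do the subtraction in one combined pass in place.
--     n = len(matrix)
--     row_mins = [min(row) for row in matrix]
--     col_mins = [min(matrix[k][j] - row_mins[k] for k in range(n)) for j in range(n)]
--     H_tmp = sum(row_mins) + sum(col_mins)
--     for i in range(n):
--         for j in range(n):
--             matrix[i][j] -= row_mins[i] + col_mins[j]
--     return (matrix, H_tmp)
-- ===== Notes on version B (the rewrite author's own statement) =====
-- stated objective: alternative
-- what changed: A interleaves computing each row/column minimum with immediately mutating the whole matrix (two stateful phases where later minima are read from the partially-updated matrix); B precomputes the row-minima list and the column-minima list of the row-reduced matrix up front from the untouched input, sums them for H, and then subtracts both in a single combined in-place pass.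
import Mathlib
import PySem

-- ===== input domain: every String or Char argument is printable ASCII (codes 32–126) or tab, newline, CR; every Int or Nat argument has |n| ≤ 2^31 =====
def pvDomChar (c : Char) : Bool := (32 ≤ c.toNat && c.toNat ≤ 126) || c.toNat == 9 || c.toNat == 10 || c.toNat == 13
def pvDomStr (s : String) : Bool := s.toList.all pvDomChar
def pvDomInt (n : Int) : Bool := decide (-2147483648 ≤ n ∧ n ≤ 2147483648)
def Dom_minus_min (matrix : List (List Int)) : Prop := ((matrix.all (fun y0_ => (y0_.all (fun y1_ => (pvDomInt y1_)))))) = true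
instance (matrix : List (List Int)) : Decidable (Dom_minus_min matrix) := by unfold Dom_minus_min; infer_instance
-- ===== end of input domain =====

-- B precomputes the row-minima and column-minima lists from the untouched input and subtracts both
-- in one combined pass, instead of A's two interleaved mutate-while-scanning phases ('alternative';
-- both Pythons mutate `matrix` in place; the theorem is about the returned value).


-- ===== PORT A =====
-- body of A's first loop: min_row = min(matrix[i]); H += min_row; matrix[i][j] -= min_row for j < n
def aStep1 (n : Nat) (st : List (List Int) × Int) (i : Nat) : List (List Int) × Int :=
  let minRow : Int := (PySem.List.min? (st.1.getD i []) id).getD 0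
  ((List.range n).foldl (fun m j => m.modify i (fun r => r.modify j (fun v => v - minRow))) st.1,
   st.2 + minRow)

-- body of A's second loop: min_column = min(row[i] for row in matrix); H += min_column; matrix[j][i] -= min_column
def aStep2 (n : Nat) (st : List (List Int) × Int) (i : Nat) : List (List Int) × Int :=
  let minCol : Int := (PySem.List.min? (st.1.map (fun row => row.getD i 0)) id).getD 0
  ((List.range n).foldl (fun m j => m.modify j (fun r => r.modify i (fun v => v - minCol))) st.1,
   st.2 + minCol)

def minus_min (matrix : List (List Int)) : List (List Int) × Int :=
  let n := matrix.length
  let s1 := (List.range n).foldl (aStep1 n) (matrix, 0)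
  (List.range n).foldl (aStep2 n) s1

-- ===== PORT B =====
def bRowMins (matrix : List (List Int)) : List Int :=
  matrix.map (fun row => (PySem.List.min? row id).getD 0)

def bColMins (matrix : List (List Int)) : List Int :=
  (List.range matrix.length).map (fun j =>
    (PySem.List.min? ((List.range matrix.length).map
        (fun k => (matrix.getD k []).getD j 0 - (bRowMins matrix).getD k 0)) id).getD 0)

def minus_min_alt (matrix : List (List Int)) : List (List Int) × Int :=
  let n := matrix.length
  let rowMins := bRowMins matrix
  let colMins := bColMins matrix
  let H := rowMins.sum + colMins.sum
  let m := (List.range n).foldl (fun m i =>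
      (List.range n).foldl (fun m j =>
        m.modify i (fun r => r.modify j (fun v => v - (rowMins.getD i 0 + colMins.getD j 0)))) m)
    matrix
  (m, H)

-- ===== PRECONDITION & SPEC =====
-- Pre_ excludes exactly the inputs where the Python A raises: a row shorter than len(matrix)
-- makes min(matrix[i]) raise ValueError (empty row) or row[i] raise IndexError.
def Pre_minus_min (matrix : List (List Int)) : Prop :=
  ∀ row ∈ matrix, matrix.length ≤ row.length
instance (matrix : List (List Int)) : Decidable (Pre_minus_min matrix) := by
  unfold Pre_minus_min; infer_instance

def pvWitness_minus_min : List (List Int) := [[3, 1], [2, 5]]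

def Spec_minus_min (matrix : List (List Int)) (out : List (List Int) × Int) : Prop := out = minus_min_alt matrix
instance (matrix : List (List Int)) (out : List (List Int) × Int) : Decidable (Spec_minus_min matrix out) := by unfold Spec_minus_min; infer_instance

-- ===== CLAIM (what is proved, stated in full; the proofs are below) =====
def Claim_equal_minus_min : Prop := ∀ (matrix : List (List Int)), Dom_minus_min matrix → Pre_minus_min matrix → Spec_minus_min matrix (minus_min matrix)

-- ===== LEMMAS AND PROOFS =====

-- value of the i-th row minimum, read off the original matrix
def rmv (matrix : List (List Int)) (k : Nat) : Int :=
  (PySem.List.min? (matrix.getD k []) id).getD 0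

-- value of the t-th column minimum of the row-reduced matrix, read off the original matrix
def cmv (matrix : List (List Int)) (t : Nat) : Int :=
  (PySem.List.min? ((List.range matrix.length).map
      (fun k => (matrix.getD k []).getD t 0 - rmv matrix k)) id).getD 0

-- subtract c from the first n entries of a row
def rsub (n : Nat) (c : Int) (r : List Int) : List Int :=
  r.mapIdx (fun j v => if j < n then v - c else v)

-- the matrix after A's first loop
def amid (matrix : List (List Int)) : List (List Int) :=
  matrix.mapIdx (fun k r => rsub matrix.length (rmv matrix k) r)

-- the matrix after the first i steps of A's second loop
def afin (matrix : List (List Int)) (i : Nat) : List (List Int) :=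
  (amid matrix).map (fun r => r.mapIdx (fun t v => if t < i then v - cmv matrix t else v))

theorem mapIdx_trivial {α : Type} (l : List α) : l.mapIdx (fun _ v => v) = l := by
  apply List.ext_getElem?
  intro t
  cases ht : l[t]? <;> simp [List.getElem?_mapIdx, ht]

theorem modify_modify_same {α : Type} (l : List α) (i : Nat) (f g : α → α) :
    (l.modify i f).modify i g = l.modify i (fun a => g (f a)) := by
  apply List.ext_getElem?
  intro k
  cases hk : l[k]? <;> simp [List.getElem?_modify, hk]
  split <;> simp

theorem foldl_modify_range {α : Type} (g : Nat → α → α) (n : Nat) (l : List α) (k : Nat) :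
    ((List.range n).foldl (fun l t => l.modify t (g t)) l)[k]? =
      if k < n then (g k) <$> l[k]? else l[k]? := by
  induction n with
  | zero => simp
  | succ n ih =>
    rw [List.range_succ, List.foldl_append]
    simp only [List.foldl_cons, List.foldl_nil, List.getElem?_modify, ih]
    rcases Nat.lt_trichotomy k n with h | h | h
    · simp [h, Nat.lt_succ_of_lt h, Nat.ne_of_gt h]
    · subst h; simp
    · have h1 : ¬ k < n := Nat.not_lt.mpr (Nat.le_of_lt h)
      have h2 : ¬ k < n+1 := Nat.not_lt.mpr h
      simp [h1, h2, Nat.ne_of_lt h]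

theorem foldl_modify_fixed {α β : Type} (idx : List β) (i : Nat) (f : β → α → α) (l : List α) :
    idx.foldl (fun l t => l.modify i (f t)) l = l.modify i (fun a => idx.foldl (fun a t => f t a) a) := by
  induction idx generalizing l with
  | nil =>
    apply List.ext_getElem?
    intro k
    cases hk : l[k]? <;> simp [List.getElem?_modify, hk] <;> split <;> rfl
  | cons h t ih => rw [List.foldl_cons, ih, modify_modify_same]; rfl

theorem foldl_modify_row_eq (g : Nat → Int → Int) (n : Nat) (r : List Int) :
    (List.range n).foldl (fun r t => r.modify t (g t)) r = r.mapIdx (fun j v => if j < n then g j v else v) := by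
  apply List.ext_getElem?
  intro k
  rw [foldl_modify_range]
  cases hk : r[k]? <;> simp [List.getElem?_mapIdx, hk] <;> split <;> simp

theorem foldl_modify_all {α : Type} (g : Nat → α → α) (l : List α) :
    (List.range l.length).foldl (fun l t => l.modify t (g t)) l = l.mapIdx (fun k a => g k a) := by
  apply List.ext_getElem?
  intro k
  rw [foldl_modify_range]
  cases hk : l[k]? <;> simp [List.getElem?_mapIdx, hk]
  simp [(List.getElem?_eq_some_iff.mp hk).1]

theorem loop1_inv (matrix : List (List Int)) (i : Nat) (hi : i ≤ matrix.length) :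
    (List.range i).foldl (aStep1 matrix.length) (matrix, 0) =
      (matrix.mapIdx (fun k r => if k < i then rsub matrix.length (rmv matrix k) r else r),
       ((List.range i).map (rmv matrix)).sum) := by
  induction i with
  | zero =>
    simp
    apply List.ext_getElem?
    intro k
    cases hk : matrix[k]? <;> simp [List.getElem?_mapIdx, hk]
  | succ i ih =>
    have hi' : i ≤ matrix.length := Nat.le_of_succ_le hi
    rw [List.range_succ, List.foldl_append, ih hi', List.foldl_cons, List.foldl_nil]
    have hrow : ((matrix.mapIdx (fun k r => if k < i then rsub matrix.length (rmv matrix k) r else r)).getD i [])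
        = matrix.getD i [] := by
      have : i < matrix.length := hi
      simp [List.getD_eq_getElem?_getD, List.getElem?_mapIdx, List.getElem?_eq_getElem this]
    unfold aStep1
    simp only [hrow]
    rw [foldl_modify_fixed]
    simp only [Prod.mk.injEq]
    refine ⟨?_, by simp [rmv]⟩
    simp only [foldl_modify_row_eq]
    apply List.ext_getElem?
    intro k
    cases hk : matrix[k]? with
    | none => simp [List.getElem?_modify, List.getElem?_mapIdx, hk]
    | some r =>
      simp only [List.getElem?_modify, List.getElem?_mapIdx, hk, Option.map_some]
      rcases Nat.lt_trichotomy k i with h | h | h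
      · simp [Nat.ne_of_gt h, h, Nat.lt_succ_of_lt h]
      · subst h
        simp [Nat.lt_irrefl, rsub, rmv]
      · simp [Nat.ne_of_lt h, Nat.not_lt.mpr (Nat.le_of_lt h), Nat.not_lt.mpr h]

theorem afin_length (matrix : List (List Int)) (i : Nat) :
    (afin matrix i).length = matrix.length := by
  simp [afin, amid]

theorem afin_zero (matrix : List (List Int)) : afin matrix 0 = amid matrix := by
  unfold afin
  simp only [Nat.not_lt_zero, if_neg, ite_false]
  rw [List.map_congr_left (fun r _ => mapIdx_trivial r)]
  exact List.map_id' (amid matrix)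

theorem col_list (matrix : List (List Int)) (hp : Pre_minus_min matrix) (i : Nat)
    (hi : i < matrix.length) :
    (afin matrix i).map (fun row => row.getD i 0) =
      (List.range matrix.length).map (fun k => (matrix.getD k []).getD i 0 - rmv matrix k) := by
  apply List.ext_getElem
  · simp [afin_length]
  intro k h1 h2
  have hk : k < matrix.length := by simpa [afin_length] using h1
  have hrl : matrix.length ≤ matrix[k].length := hp _ (List.getElem_mem hk)
  have hil : i < matrix[k].length := Nat.lt_of_lt_of_le hi hrl
  simp [afin, amid, rsub, List.getElem_mapIdx, List.getD_eq_getElem?_getD,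
    List.getElem?_mapIdx, List.getElem?_eq_getElem, hk, hil, hi]

theorem step_afin (matrix : List (List Int)) (i : Nat) :
    (afin matrix i).map (fun r => r.modify i (fun v => v - cmv matrix i)) = afin matrix (i + 1) := by
  unfold afin
  rw [List.map_map]
  apply List.map_congr_left
  intro r _
  apply List.ext_getElem?
  intro t
  cases ht : r[t]? with
  | none => simp [List.getElem?_modify, List.getElem?_mapIdx, ht]
  | some v =>
    simp only [Function.comp_apply, List.getElem?_modify, List.getElem?_mapIdx, ht, Option.map_some]
    rcases Nat.lt_trichotomy t i with h | h | h
    · simp [Nat.ne_of_gt h, h, Nat.lt_succ_of_lt h]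
    · subst h; simp
    · simp [Nat.ne_of_lt h, Nat.not_lt.mpr (Nat.le_of_lt h), Nat.not_lt.mpr h]

theorem loop2_inv (matrix : List (List Int)) (hp : Pre_minus_min matrix) (i : Nat)
    (hi : i ≤ matrix.length) (s : Int) :
    (List.range i).foldl (aStep2 matrix.length) (amid matrix, s) =
      (afin matrix i, s + ((List.range i).map (cmv matrix)).sum) := by
  induction i with
  | zero => simp [afin_zero]
  | succ i ih =>
    have hi' : i ≤ matrix.length := Nat.le_of_succ_le hi
    rw [List.range_succ, List.foldl_append, ih hi', List.foldl_cons, List.foldl_nil]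
    unfold aStep2
    have hc : ((PySem.List.min? ((afin matrix i).map (fun row => row.getD i 0)) id).getD 0)
        = cmv matrix i := by
      rw [col_list matrix hp i hi]; rfl
    simp only [hc, Prod.mk.injEq]
    constructor
    · rw [show List.range matrix.length = List.range (afin matrix i).length by rw [afin_length],
        foldl_modify_all]
      calc (afin matrix i).mapIdx (fun _ r => r.modify i (fun v => v - cmv matrix i))
          = (afin matrix i).map (fun r => r.modify i (fun v => v - cmv matrix i)) := by
            apply List.ext_getElem?
            intro t
            cases ht : (afin matrix i)[t]? <;> simp [List.getElem?_mapIdx, ht]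
        _ = afin matrix (i + 1) := step_afin matrix i
    · simp; ring

theorem rowMins_getD (matrix : List (List Int)) (k : Nat) (hk : k < matrix.length) :
    (bRowMins matrix).getD k 0 = rmv matrix k := by
  simp [bRowMins, rmv, List.getD_eq_getElem?_getD, List.getElem?_map,
    List.getElem?_eq_getElem hk]

theorem rowMins_eq (matrix : List (List Int)) :
    bRowMins matrix = (List.range matrix.length).map (rmv matrix) := by
  apply List.ext_getElem
  · simp [bRowMins]
  intro k h1 h2
  have hk : k < matrix.length := by simpa [bRowMins] using h1
  simp [bRowMins, rmv, List.getD_eq_getElem?_getD, List.getElem?_eq_getElem hk]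

theorem colMins_eq (matrix : List (List Int)) :
    bColMins matrix = (List.range matrix.length).map (cmv matrix) := by
  unfold bColMins
  apply List.map_congr_left
  intro j _
  unfold cmv
  congr 1
  congr 1
  apply List.map_congr_left
  intro k hk
  rw [rowMins_getD matrix k (List.mem_range.mp hk)]

theorem colMins_getD (matrix : List (List Int)) (t : Nat) (ht : t < matrix.length) :
    (bColMins matrix).getD t 0 = cmv matrix t := by
  rw [colMins_eq]
  simp [List.getD_eq_getElem?_getD, List.getElem?_map, List.getElem?_eq_getElem, ht]

theorem bmat_eq (matrix : List (List Int)) :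
    (List.range matrix.length).foldl (fun m i =>
      (List.range matrix.length).foldl (fun m j =>
        m.modify i (fun r => r.modify j
          (fun v => v - ((bRowMins matrix).getD i 0 + (bColMins matrix).getD j 0)))) m) matrix
      = afin matrix matrix.length := by
  have hstep : ∀ (m : List (List Int)) (i : Nat),
      (List.range matrix.length).foldl (fun m j =>
        m.modify i (fun r => r.modify j
          (fun v => v - ((bRowMins matrix).getD i 0 + (bColMins matrix).getD j 0)))) m
      = m.modify i (fun r => r.mapIdx (fun j v =>
          if j < matrix.length then v - ((bRowMins matrix).getD i 0 + (bColMins matrix).getD j 0) else v)) := by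
    intro m i
    rw [foldl_modify_fixed]
    congr 1
    funext a
    rw [foldl_modify_row_eq]
  simp only [hstep]
  rw [foldl_modify_all]
  apply List.ext_getElem?
  intro k
  cases hk : matrix[k]? with
  | none =>
    have hkn : ¬ k < matrix.length := by
      intro h; rw [List.getElem?_eq_getElem h] at hk; cases hk
    simp [afin, amid, List.getElem?_mapIdx, List.getElem?_map, hk, List.getElem?_eq_none_iff.mpr (Nat.le_of_not_lt hkn)]
  | some r =>
    have hkn : k < matrix.length := (List.getElem?_eq_some_iff.mp hk).1
    simp only [afin, amid, List.getElem?_mapIdx, List.getElem?_map, hk, Option.map_some]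
    apply congrArg some
    apply List.ext_getElem?
    intro t
    cases ht : r[t]? with
    | none => simp [rsub, List.getElem?_mapIdx, ht]
    | some v =>
      simp only [rsub, List.getElem?_mapIdx, ht, Option.map_some]
      apply congrArg some
      by_cases h : t < matrix.length
      · rw [rowMins_getD matrix k hkn, colMins_getD matrix t h]
        simp [h]
        ring
      · simp [h]
theorem amid_eq (matrix : List (List Int)) :
    matrix.mapIdx (fun k r => if k < matrix.length then rsub matrix.length (rmv matrix k) r else r)
      = amid matrix := by
  unfold amid
  apply List.ext_getElem?
  intro k
  cases hk : matrix[k]? with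
  | none => simp [List.getElem?_mapIdx, hk]
  | some r =>
    simp [List.getElem?_mapIdx, hk, (List.getElem?_eq_some_iff.mp hk).1]

-- ===== VERDICT (by name: the statement is the Claim_ definition above) =====
theorem minus_min_spec : Claim_equal_minus_min := by
  intro matrix _ hp
  unfold Spec_minus_min minus_min minus_min_alt
  dsimp only
  rw [loop1_inv matrix matrix.length (Nat.le_refl _), amid_eq,
    loop2_inv matrix hp matrix.length (Nat.le_refl _) _, bmat_eq]
  rw [rowMins_eq, colMins_eq]
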